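-- pv_equiv track=rewrite | github.com/gammastudios/experiment-routing-spike | xp_rtr/utils/xprtr_cli.py | _assign_cohorts_mod100
-- ===== SOURCE A (Python) =====
-- from typing import Dict, List, Tuple
--
-- def _assign_cohorts_mod100(client_id_ranges: List[Tuple[int, int]]) -> Dict[str, List[int]]:
--     """
--     Assign cohorts using the mod100 strategy.
--     Cohort names follow the pattern "00", "01", "02", ..., "99".
--
--     Args:
--         client_id_ranges(List[Tuple[int, int]]): list of (min, max) tuples.
--
--     Returns:
--         Dict[str, List[int]]: dictionary of cohort name and list of client ids.
--     """
--     cohort_assignments = {}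
--     for min_client_id, max_client_id in client_id_ranges:
--         for client_id in range(min_client_id, max_client_id + 1):
--             cohort_name = f"mod100-cohort-{client_id % 100:02d}"
--             if cohort_name not in cohort_assignments:
--                 cohort_assignments[cohort_name] = []
--             cohort_assignments[cohort_name].append(client_id)
--     return cohort_assignments
-- ===== SOURCE B (Python) =====
-- def _assign_cohorts_mod100(client_id_ranges):
--     # pass 1: cohort residues in order of first appearance
--     residues = []
--     for lo, hi in client_id_ranges:
--         for off in range(min(hi - lo + 1, 100)):
--             r = (lo + off) % 100
--             if r not in residues:
--                 residues.append(r)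
--     # pass 2: each cohort's ids by direct arithmetic across all ranges
--     return {
--         f"mod100-cohort-{r:02d}": [
--             i
--             for lo, hi in client_id_ranges
--             for i in range(lo + (r - lo) % 100, hi + 1, 100)
--         ]
--         for r in residues
--     }
-- ===== Notes on version B (the rewrite author's own statement) =====
-- stated objective: alternative
-- what changed: A scans every client id once bucketing it into the dict; B is two staged passes: it first computes the list of cohort residues in order of first appearance (at most 100 offsets per range, no dict), then builds each cohort's whole id list by direct arithmetic-progression generation range(lo+(r-lo)%100, hi+1, 100) across all ranges in a dict comprehension.
import Mathlib
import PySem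

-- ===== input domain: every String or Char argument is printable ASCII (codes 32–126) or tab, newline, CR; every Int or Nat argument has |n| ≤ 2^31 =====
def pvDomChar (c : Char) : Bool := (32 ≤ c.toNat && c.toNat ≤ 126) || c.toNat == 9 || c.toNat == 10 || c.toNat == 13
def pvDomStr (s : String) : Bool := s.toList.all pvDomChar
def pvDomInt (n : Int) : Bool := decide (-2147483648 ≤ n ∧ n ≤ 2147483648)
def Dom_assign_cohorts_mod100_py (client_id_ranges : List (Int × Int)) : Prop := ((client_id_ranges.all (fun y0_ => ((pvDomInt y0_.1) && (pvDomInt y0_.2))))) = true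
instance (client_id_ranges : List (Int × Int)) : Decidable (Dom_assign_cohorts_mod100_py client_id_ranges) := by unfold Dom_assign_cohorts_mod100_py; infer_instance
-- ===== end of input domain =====

-- B replaces A's one-pass per-client-id dict bucketing with two staged passes: first the cohort
-- residues in first-appearance order, then each cohort's id list generated by direct arithmetic.

-- shared formatting helper: f"mod100-cohort-{r:02d}", exact for the reachable residues 0 <= r <= 99
def pvPrefix : List Char := ['m','o','d','1','0','0','-','c','o','h','o','r','t','-']

def pvFmtChars (r : Int) : List Char :=
  if r < 10 then '0' :: PySem.Int.toChars r else PySem.Int.toChars r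

-- ===== PORT A =====
def pvName (i : Int) : String := String.ofList (pvPrefix ++ pvFmtChars (PySem.Int.mod i 100))

-- A's inner-loop body: bucket one client_id (setdefault-to-[] then append)
def pvStepA (d : PySem.Dict String (List Int)) (client_id : Int) : PySem.Dict String (List Int) :=
  let cohort_name := pvName client_id
  let d' := if d.contains cohort_name then d else d.insert cohort_name []
  d'.modify cohort_name [] (fun l => l ++ [client_id])

def assign_cohorts_mod100_py (client_id_ranges : List (Int × Int)) : List (String × List Int) :=
  (client_id_ranges.foldl
    (fun d p => (PySem.List.pyRange p.1 (p.2 + 1) 1).foldl pvStepA d)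
    PySem.Dict.empty).items

-- ===== PORT B =====
def pvFmtName (r : Int) : String := String.ofList (pvPrefix ++ pvFmtChars r)

-- pass 1: cohort residues in order of first appearance ('if r not in residues: residues.append(r)')
def pvResidues (client_id_ranges : List (Int × Int)) : PySem.Set Int :=
  client_id_ranges.foldl
    (fun residues p =>
      (PySem.List.pyRange 0 (min (p.2 - p.1 + 1) 100) 1).foldl
        (fun residues off => PySem.Set.add residues (PySem.Int.mod (p.1 + off) 100))
        residues)
    PySem.Set.empty

-- pass 2: one cohort's ids, by direct arithmetic across all ranges
def pvCohortIds (client_id_ranges : List (Int × Int)) (r : Int) : List Int :=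
  client_id_ranges.flatMap
    (fun p => PySem.List.pyRange (p.1 + PySem.Int.mod (r - p.1) 100) (p.2 + 1) 100)

def assign_cohorts_mod100_py_alt (client_id_ranges : List (Int × Int)) : List (String × List Int) :=
  ((pvResidues client_id_ranges).foldl
    (fun d r => d.insert (pvFmtName r) (pvCohortIds client_id_ranges r))
    PySem.Dict.empty).items

-- ===== PRECONDITION & SPEC =====
def Spec_assign_cohorts_mod100_py (client_id_ranges : List (Int × Int)) (out : List (String × List Int)) : Prop := out = assign_cohorts_mod100_py_alt client_id_ranges
instance (client_id_ranges : List (Int × Int)) (out : List (String × List Int)) : Decidable (Spec_assign_cohorts_mod100_py client_id_ranges out) := by unfold Spec_assign_cohorts_mod100_py; infer_instance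

-- ===== CLAIM (what is proved, stated in full; the proofs are below) =====
def Claim_equal_assign_cohorts_mod100_py : Prop := ∀ (client_id_ranges : List (Int × Int)), Dom_assign_cohorts_mod100_py client_id_ranges → Spec_assign_cohorts_mod100_py client_id_ranges (assign_cohorts_mod100_py client_id_ranges)

-- ===== LEMMAS AND PROOFS =====

-- the flattened list of all client ids A scans, in scan order (proof-only helper)
def pvIds (rs : List (Int × Int)) : List Int :=
  rs.flatMap (fun p => PySem.List.pyRange p.1 (p.2 + 1) 1)

lemma pv_foldl_foldl_flatMap {α β γ : Type} (rs : List α) (g : α → List β)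
    (step : γ → β → γ) (init : γ) :
    rs.foldl (fun d p => (g p).foldl step d) init = (rs.flatMap g).foldl step init := by
  induction rs generalizing init with
  | nil => rfl
  | cons p rs ih => simp [List.foldl_cons, List.flatMap_cons, List.foldl_append, ih]

-- ---- A's dict characterised: keys and per-key value ----

lemma pv_stepA_eq_modify (d : PySem.Dict String (List Int)) (i : Int) :
    pvStepA d i = d.modify (pvName i) [] (fun l => l ++ [i]) := by
  unfold pvStepA
  by_cases h : d.contains (pvName i) = true
  · simp [h]
  · simp only [h]
    simp [PySem.Dict.modify, PySem.Dict.insert_insert_self,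
      PySem.Dict.getD_insert_self, PySem.Dict.getD_of_not_contains _ _ (by simpa using h)]

lemma pvA_eq_modify_fold (rs : List (Int × Int)) :
    assign_cohorts_mod100_py rs =
      ((pvIds rs).foldl (fun d i => d.modify (pvName i) [] (fun l => l ++ [i]))
        PySem.Dict.empty).items := by
  unfold assign_cohorts_mod100_py pvIds
  rw [pv_foldl_foldl_flatMap]
  congr 1
  exact PySem.List.foldl_congr_mem _ _ _ _ (fun d i _ => pv_stepA_eq_modify d i)

lemma pvA_keys (rs : List (Int × Int)) :
    ((pvIds rs).foldl (fun d i => d.modify (pvName i) [] (fun l => l ++ [i]))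
        PySem.Dict.empty).keys = PySem.Set.ofList ((pvIds rs).map pvName) := by
  rw [PySem.Dict.keys_foldl_modify_key]
  simp [PySem.Set.update_nil_left]

lemma pvA_getD (rs : List (Int × Int)) (k : String) :
    ((pvIds rs).foldl (fun d i => d.modify (pvName i) [] (fun l => l ++ [i]))
        PySem.Dict.empty).getD k []
      = (pvIds rs).filter (fun i => pvName i == k) := by
  have h := PySem.Dict.getD_foldl_modify_append
    (l := (pvIds rs).map (fun i => (pvName i, i)))
    (d := (PySem.Dict.empty : PySem.Dict String (List Int))) (c := k)
  rw [List.foldl_map] at h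
  rw [h, List.filter_map, List.map_map]
  simp [Function.comp_def]

lemma pvA_items (rs : List (Int × Int)) :
    assign_cohorts_mod100_py rs =
      (PySem.Set.ofList ((pvIds rs).map pvName)).map
        (fun k => (k, (pvIds rs).filter (fun i => pvName i == k))) := by
  rw [pvA_eq_modify_fold,
    PySem.Dict.items_eq_map_keys _ (PySem.Dict.nodup_keys_foldl_modify_key _ _ _ _ _
      PySem.Dict.nodup_keys_empty) [],
    pvA_keys]
  exact List.map_congr_left (fun k _ => by rw [pvA_getD])

-- ---- B's residue pass equals the ordered dedup of all scanned residues ----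

lemma pv_update_flatMap {α β : Type} [BEq β] [LawfulBEq β] (h : α → List β) :
    ∀ (rs : List α) (s : PySem.Set β),
      rs.foldl (fun s p => PySem.Set.update s (h p)) s = PySem.Set.update s (rs.flatMap h) := by
  intro rs
  induction rs with
  | nil => intro s; simp [PySem.Set.update_nil]
  | cons p rs ih =>
    intro s
    simp only [List.foldl_cons, List.flatMap_cons, ih, PySem.Set.update_append]

lemma pv_update_of_forall_mem {β : Type} [BEq β] [LawfulBEq β] (s : PySem.Set β) (l : List β)
    (h : ∀ x ∈ l, x ∈ s) : PySem.Set.update s l = s := by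
  rw [PySem.Set.update_eq_append_filter]
  have hnil : (PySem.Set.ofList l).filter (fun y => !(PySem.Set.contains s y)) = [] := by
    apply List.filter_eq_nil_iff.mpr
    intro y hy
    simpa using h y ((PySem.Set.mem_ofList _ _).mp hy)
  rw [hnil, List.append_nil]

lemma pv_range_update (lo hi : Int) (s : PySem.Set Int) :
    PySem.Set.update s ((PySem.List.pyRange lo (hi + 1) 1).map (fun i => PySem.Int.mod i 100))
      = PySem.Set.update s ((PySem.List.pyRange 0 (min (hi - lo + 1) 100) 1).map
          (fun off => PySem.Int.mod (lo + off) 100)) := by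
  by_cases hle : hi + 1 ≤ lo
  · rw [PySem.List.pyRange_one_eq_nil hle,
      PySem.List.pyRange_one_eq_nil (by omega : min (hi - lo + 1) 100 ≤ 0)]
    rfl
  · have hnn : (0:Int) ≤ hi + 1 - lo := by omega
    set n : Nat := (hi + 1 - lo).toNat with hndef
    set m : Nat := min n 100 with hmdef
    have hmn : m ≤ n := by omega
    rw [PySem.List.pyRange_one, PySem.List.pyRange_one, List.map_map, List.map_map]
    rw [show (hi + 1 - lo).toNat = n from rfl,
      show (min (hi - lo + 1) 100 - 0).toNat = m from by omega]
    have hfun2 : ((fun off => PySem.Int.mod (lo + off) 100) ∘ fun k : Nat => (0:Int) + k)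
        = fun k : Nat => PySem.Int.mod (lo + k) 100 := by
      funext k; simp
    have hfun1 : ((fun i => PySem.Int.mod i 100) ∘ fun k : Nat => lo + k)
        = fun k : Nat => PySem.Int.mod (lo + k) 100 := by
      funext k; simp
    rw [hfun1, hfun2]
    rw [show List.range n = List.range m ++ (List.range (n - m)).map (m + ·) from by
      rw [← List.range_add]; congr 1; omega]
    rw [List.map_append, PySem.Set.update_append, List.map_map]
    apply pv_update_of_forall_mem
    intro x hx
    obtain ⟨j, hj, rfl⟩ := List.mem_map.mp hx
    have hj' : j < n - m := List.mem_range.mp hj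
    have hm100 : m = 100 := by omega
    apply (PySem.Set.mem_update _ _ _).mpr
    right
    apply List.mem_map.mpr
    refine ⟨j % 100, List.mem_range.mpr (by omega), ?_⟩
    simp only [Function.comp_apply]
    rw [PySem.Int.mod_eq_emod_of_pos (by norm_num), PySem.Int.mod_eq_emod_of_pos (by norm_num),
      hm100]
    push_cast
    omega

lemma pv_residues_eq (rs : List (Int × Int)) :
    pvResidues rs = PySem.Set.ofList ((pvIds rs).map (fun i => PySem.Int.mod i 100)) := by
  unfold pvResidues pvIds
  have hinner : ∀ (s : PySem.Set Int) (p : Int × Int),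
      (PySem.List.pyRange 0 (min (p.2 - p.1 + 1) 100) 1).foldl
        (fun residues off => PySem.Set.add residues (PySem.Int.mod (p.1 + off) 100)) s
      = PySem.Set.update s ((PySem.List.pyRange p.1 (p.2 + 1) 1).map
          (fun i => PySem.Int.mod i 100)) := by
    intro s p
    rw [← PySem.Set.update_map_eq_foldl_add, pv_range_update]
  rw [PySem.List.foldl_congr_mem _ _ _ _ (fun s p _ => hinner s p),
    pv_update_flatMap, ← List.map_flatMap]
  exact PySem.Set.update_nil_left _

-- ---- formatting is injective on the reachable residues 0..99 ----

lemma pv_fmt_inj : ∀ x : Nat, x < 100 → ∀ y : Nat, y < 100 → x ≠ y →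
    pvFmtChars (x : Int) ≠ pvFmtChars (y : Int) := by
  set_option maxRecDepth 10000 in decide

lemma pv_fmtName_inj {x y : Int} (hx0 : 0 ≤ x) (hx : x < 100) (hy0 : 0 ≤ y) (hy : y < 100)
    (h : pvFmtName x = pvFmtName y) : x = y := by
  by_contra hne
  have hl : pvFmtChars x = pvFmtChars y := by
    have ht := congrArg String.toList h
    simp only [pvFmtName, String.toList_ofList] at ht
    exact List.append_cancel_left ht
  have hx' : ((x.toNat : Nat) : Int) = x := by omega
  have hy' : ((y.toNat : Nat) : Int) = y := by omega
  exact pv_fmt_inj x.toNat (by omega) y.toNat (by omega) (by omega) (by rw [hx', hy']; exact hl)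

lemma pv_mem_residues_bounds (rs : List (Int × Int)) (r : Int) (h : r ∈ pvResidues rs) :
    0 ≤ r ∧ r < 100 := by
  rw [pv_residues_eq] at h
  obtain ⟨i, _, rfl⟩ := List.mem_map.mp ((PySem.Set.mem_ofList _ _).mp h)
  exact ⟨PySem.Int.mod_nonneg i (by norm_num), PySem.Int.mod_lt i (by norm_num)⟩

lemma pv_residues_fmt_nodup (rs : List (Int × Int)) : ((pvResidues rs).map pvFmtName).Nodup := by
  apply List.Nodup.map_on _ (by rw [pv_residues_eq]; exact PySem.Set.nodup_ofList _)
  intro x hx y hy hf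
  obtain ⟨hx0, hx1⟩ := pv_mem_residues_bounds rs x hx
  obtain ⟨hy0, hy1⟩ := pv_mem_residues_bounds rs y hy
  exact pv_fmtName_inj hx0 hx1 hy0 hy1 hf

lemma pvB_items (rs : List (Int × Int)) :
    assign_cohorts_mod100_py_alt rs =
      (pvResidues rs).map (fun r => (pvFmtName r, pvCohortIds rs r)) := by
  unfold assign_cohorts_mod100_py_alt
  rw [PySem.Dict.items_foldl_insert_fresh _ _ _ _ (fun r _ => PySem.Dict.contains_empty _)
    (pv_residues_fmt_nodup rs)]
  simp [PySem.Dict.empty]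

-- ---- ordered dedup commutes with an injective map ----

lemma pv_ofList_map (f : Int → String) (xs : List Int)
    (hinj : ∀ x ∈ xs, ∀ y ∈ xs, f x = f y → x = y) :
    PySem.Set.ofList (xs.map f) = (PySem.Set.ofList xs).map f := by
  induction xs using List.reverseRecOn with
  | nil => simp [PySem.Set.ofList_nil]
  | append_singleton l x ih =>
    have hinj' : ∀ a ∈ l, ∀ b ∈ l, f a = f b → a = b :=
      fun a ha b hb => hinj a (by simp [ha]) b (by simp [hb])
    rw [List.map_append, List.map_singleton, PySem.Set.ofList_append_singleton,
      PySem.Set.ofList_append_singleton, ih hinj']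
    by_cases hx : x ∈ PySem.Set.ofList l
    · rw [PySem.Set.add_of_mem hx, PySem.Set.add_of_mem (List.mem_map_of_mem hx)]
    · have hfx : f x ∉ (PySem.Set.ofList l).map f := by
        intro hmem
        obtain ⟨y, hy, hfy⟩ := List.mem_map.mp hmem
        have hyl : y ∈ l := (PySem.Set.mem_ofList _ _).mp hy
        have heq : y = x :=
          hinj y (List.mem_append_left _ hyl) x (List.mem_append_right _ (by simp)) hfy
        exact hx (heq ▸ hy)
      rw [PySem.Set.add_of_not_mem hx, PySem.Set.add_of_not_mem hfx, List.map_append,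
        List.map_singleton]

-- ---- boolean name test reduces to a residue test ----

lemma pv_name_cond (r : Int) (h0 : 0 ≤ r) (h1 : r < 100) (i : Int) :
    (pvName i == pvFmtName r) = (PySem.Int.mod i 100 == r) := by
  rw [Bool.eq_iff_iff]
  simp only [beq_iff_eq]
  constructor
  · intro h
    exact pv_fmtName_inj (PySem.Int.mod_nonneg i (by norm_num))
      (PySem.Int.mod_lt i (by norm_num)) h0 h1 h
  · intro h; rw [pvName, h]; rfl

-- ---- ids of [lo,hi] with residue r are the progression starting at lo + (r-lo)%100 ----

lemma pv_pyRange100_empty {a b : Int} (h : b ≤ a) : PySem.List.pyRange a b 100 = [] := by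
  rw [PySem.List.pyRange_of_pos _ _ (by norm_num : (0:Int) < 100), if_neg (by omega)]
  rfl

lemma pv_pyRange100_cons {a b : Int} (h : a < b) :
    PySem.List.pyRange a b 100 = a :: PySem.List.pyRange (a + 100) b 100 := by
  rw [PySem.List.pyRange_of_pos _ _ (by norm_num : (0:Int) < 100),
    PySem.List.pyRange_of_pos _ _ (by norm_num : (0:Int) < 100), if_pos h]
  rw [show ((b - a + 100 - 1) / 100).toNat =
      (if a + 100 < b then ((b - (a + 100) + 100 - 1) / 100).toNat else 0) + 1 from by
        split <;> omega]
  rw [List.range_succ_eq_map, List.map_cons, List.map_map]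
  congr 1
  · simp
  · apply List.map_congr_left; intro x _
    simp only [Function.comp_apply, Nat.succ_eq_add_one]
    push_cast
    ring

lemma pv_filter_range_aux (r : Int) (h0 : 0 ≤ r) (h1 : r < 100) :
    ∀ (n : Nat) (lo hi : Int), hi + 1 - lo = (n : Int) →
    (PySem.List.pyRange lo (hi + 1) 1).filter (fun i => PySem.Int.mod i 100 == r)
      = PySem.List.pyRange (lo + PySem.Int.mod (r - lo) 100) (hi + 1) 100 := by
  intro n
  induction n with
  | zero =>
    intro lo hi h
    rw [PySem.List.pyRange_one_eq_nil (by omega), pv_pyRange100_empty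
      (by have := PySem.Int.mod_nonneg (r - lo) (b := 100) (by norm_num); omega)]
    rfl
  | succ n ih =>
    intro lo hi h
    have hlt : lo < hi + 1 := by omega
    rw [PySem.List.pyRange_one_cons hlt, List.filter_cons]
    have hm := PySem.Int.mod_eq_emod_of_pos (a := r - lo) (b := 100) (by norm_num)
    have hm1 := PySem.Int.mod_eq_emod_of_pos (a := r - (lo + 1)) (b := 100) (by norm_num)
    have hml := PySem.Int.mod_eq_emod_of_pos (a := lo) (b := 100) (by norm_num)
    have ihx := ih (lo + 1) hi (by omega)
    by_cases hc : PySem.Int.mod lo 100 = r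
    · rw [if_pos (by simpa using hc), ihx]
      rw [show lo + 1 + PySem.Int.mod (r - (lo + 1)) 100 = lo + 100 from by
        rw [hm1]; rw [hml] at hc; omega]
      rw [show lo + PySem.Int.mod (r - lo) 100 = lo from by
        rw [hm]; rw [hml] at hc; omega]
      rw [pv_pyRange100_cons hlt]
    · rw [if_neg (by simpa using hc), ihx]
      congr 1
      rw [hm, hm1]
      rw [hml] at hc
      omega

lemma pv_filter_range (r : Int) (h0 : 0 ≤ r) (h1 : r < 100) (lo hi : Int) :
    (PySem.List.pyRange lo (hi + 1) 1).filter (fun i => PySem.Int.mod i 100 == r)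
      = PySem.List.pyRange (lo + PySem.Int.mod (r - lo) 100) (hi + 1) 100 := by
  by_cases hn : 0 ≤ hi + 1 - lo
  · exact pv_filter_range_aux r h0 h1 (hi + 1 - lo).toNat lo hi (by omega)
  · rw [PySem.List.pyRange_one_eq_nil (by omega), pv_pyRange100_empty
      (by have := PySem.Int.mod_nonneg (r - lo) (b := 100) (by norm_num); omega)]
    rfl

lemma pv_cohort_eq (rs : List (Int × Int)) (r : Int) (h0 : 0 ≤ r) (h1 : r < 100) :
    (pvIds rs).filter (fun i => pvName i == pvFmtName r) = pvCohortIds rs r := by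
  unfold pvIds pvCohortIds
  rw [List.filter_congr (fun i _ => pv_name_cond r h0 h1 i), List.filter_flatMap]
  exact List.flatMap_congr (fun p _ => pv_filter_range r h0 h1 p.1 p.2)

-- ===== VERDICT (by name: the statement is the Claim_ definition above) =====
theorem assign_cohorts_mod100_py_spec : Claim_equal_assign_cohorts_mod100_py := by
  intro rs _
  unfold Spec_assign_cohorts_mod100_py
  rw [pvA_items, pvB_items, pv_residues_eq]
  have hmap : (pvIds rs).map pvName
      = ((pvIds rs).map (fun i => PySem.Int.mod i 100)).map pvFmtName := by
    rw [List.map_map]; rfl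
  have hinj : ∀ x ∈ (pvIds rs).map (fun i => PySem.Int.mod i 100),
      ∀ y ∈ (pvIds rs).map (fun i => PySem.Int.mod i 100), pvFmtName x = pvFmtName y → x = y := by
    intro x hx y hy hf
    obtain ⟨i, _, rfl⟩ := List.mem_map.mp hx
    obtain ⟨j, _, rfl⟩ := List.mem_map.mp hy
    exact pv_fmtName_inj (PySem.Int.mod_nonneg _ (by norm_num)) (PySem.Int.mod_lt _ (by norm_num))
      (PySem.Int.mod_nonneg _ (by norm_num)) (PySem.Int.mod_lt _ (by norm_num)) hf
  rw [hmap, pv_ofList_map pvFmtName _ hinj, List.map_map]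
  apply List.map_congr_left
  intro r hr
  obtain ⟨i, _, rfl⟩ := List.mem_map.mp ((PySem.Set.mem_ofList _ _).mp hr)
  simp only [Function.comp_apply]
  rw [pv_cohort_eq rs _ (PySem.Int.mod_nonneg i (by norm_num)) (PySem.Int.mod_lt i (by norm_num))]
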